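-- pv_equiv track=rewrite | github.com/sijoonlee/self-driving-course | projects/01_object_dectection_in_an_urban_environment/nd013-c1-vision-starter/create_splits.py | split_file_list
-- ===== SOURCE A (Python) =====
-- def split_file_list(all_processed_files, magic_number = 7):
--     # Train set: 60% if magic_number = 7
--     def is_train(x):
--         return x[0] % 10 < magic_number
--
--     # Validation set: 30% if magic_number = 7
--     def is_val(x):
--         return x[0] % 10 > magic_number
--
--     # Test set: always 10%
--     def is_test(x):
--         return x[0] % 10 == magic_number
--
--     recover = lambda x : x[1] # get rid of i from (i, file)
--
--     all_files_enumerated = [ (i, file) for (i, file) in enumerate(all_processed_files) ]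
--
--     train_files = list(map(recover, filter(is_train, all_files_enumerated)))
--     val_files = list(map(recover, filter(is_val, all_files_enumerated)))
--     test_files = list(map(recover, filter(is_test, all_files_enumerated)))
--
--     return train_files, val_files, test_files
-- ===== SOURCE B (Python) =====
-- def split_file_list(all_processed_files, magic_number = 7):
--     # Single pass: bucket each file by its index mod 10 in one loop.
--     train_files, val_files, test_files = [], [], []
--     for i, file in enumerate(all_processed_files):
--         m = i % 10
--         if m < magic_number:
--             train_files.append(file)
--         elif m > magic_number:
--             val_files.append(file)
--         else:
--             test_files.append(file)
--     return train_files, val_files, test_files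
-- ===== Notes on version B (the rewrite author's own statement) =====
-- stated objective: faster
-- what changed: Three filter+map passes over the enumerated list are replaced by one enumerate loop that dispatches each file into one of three buckets by a single i % 10 comparison chain.
import Mathlib
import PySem

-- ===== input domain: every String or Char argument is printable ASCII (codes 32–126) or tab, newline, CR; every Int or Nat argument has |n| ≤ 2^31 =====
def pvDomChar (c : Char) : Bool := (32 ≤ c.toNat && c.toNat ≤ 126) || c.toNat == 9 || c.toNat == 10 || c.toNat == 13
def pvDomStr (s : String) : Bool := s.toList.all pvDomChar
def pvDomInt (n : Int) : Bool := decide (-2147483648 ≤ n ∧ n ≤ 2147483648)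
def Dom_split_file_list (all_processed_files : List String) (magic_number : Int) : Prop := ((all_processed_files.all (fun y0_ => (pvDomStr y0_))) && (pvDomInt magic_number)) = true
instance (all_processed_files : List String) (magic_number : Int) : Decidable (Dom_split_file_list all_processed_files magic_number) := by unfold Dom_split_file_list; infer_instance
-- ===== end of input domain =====

-- B replaces A's three filter+map passes over the enumerated list by one loop that
-- buckets each file by i % 10 (objective: simpler, a single pass).

-- ===== PORT A =====
def split_file_list (all_processed_files : List String) (magic_number : Int) : List String × List String × List String :=
  let all_files_enumerated := PySem.List.enumerate all_processed_files
  let train_files := (all_files_enumerated.filter (fun x => decide (PySem.Int.mod x.1 10 < magic_number))).map (fun x => x.2)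
  let val_files := (all_files_enumerated.filter (fun x => decide (PySem.Int.mod x.1 10 > magic_number))).map (fun x => x.2)
  let test_files := (all_files_enumerated.filter (fun x => decide (PySem.Int.mod x.1 10 = magic_number))).map (fun x => x.2)
  (train_files, val_files, test_files)

-- ===== PORT B =====
-- the single forward loop of Source B, as structural recursion carrying the index
def sflGo (magic_number : Int) : List String → Int → List String × List String × List String
  | [], _ => ([], [], [])
  | file :: rest, i =>
    let r := sflGo magic_number rest (i + 1)
    let m := PySem.Int.mod i 10
    if m < magic_number then (file :: r.1, r.2.1, r.2.2)
    else if m > magic_number then (r.1, file :: r.2.1, r.2.2)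
    else (r.1, r.2.1, file :: r.2.2)

def split_file_list_alt (all_processed_files : List String) (magic_number : Int) : List String × List String × List String :=
  sflGo magic_number all_processed_files 0

-- ===== PRECONDITION & SPEC =====
def Spec_split_file_list (all_processed_files : List String) (magic_number : Int) (out : List String × List String × List String) : Prop := out = split_file_list_alt all_processed_files magic_number
instance (all_processed_files : List String) (magic_number : Int) (out : List String × List String × List String) : Decidable (Spec_split_file_list all_processed_files magic_number out) := by unfold Spec_split_file_list; infer_instance

-- ===== CLAIM (what is proved, stated in full; the proofs are below) =====
def Claim_equal_split_file_list : Prop := ∀ (all_processed_files : List String) (magic_number : Int), Dom_split_file_list all_processed_files magic_number → Spec_split_file_list all_processed_files magic_number (split_file_list all_processed_files magic_number)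

-- ===== LEMMAS AND PROOFS =====
theorem sflGo_eq (magic_number : Int) (xs : List String) : ∀ (s : Int),
    sflGo magic_number xs s =
      (((PySem.List.enumerate xs s).filter (fun x => decide (PySem.Int.mod x.1 10 < magic_number))).map (fun x => x.2),
       ((PySem.List.enumerate xs s).filter (fun x => decide (PySem.Int.mod x.1 10 > magic_number))).map (fun x => x.2),
       ((PySem.List.enumerate xs s).filter (fun x => decide (PySem.Int.mod x.1 10 = magic_number))).map (fun x => x.2)) := by
  induction xs with
  | nil => intro s; simp [sflGo, PySem.List.enumerate_nil]
  | cons f rest ih =>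
    intro s
    simp only [sflGo, PySem.List.enumerate_cons, List.filter_cons, ih (s + 1)]
    by_cases h1 : s % 10 < magic_number
    · have h2 : ¬ magic_number < s % 10 := by omega
      have h3 : ¬ s % 10 = magic_number := by omega
      simp [h1, h2, h3]
    · by_cases h2 : magic_number < s % 10
      · have h3 : ¬ s % 10 = magic_number := by omega
        simp [h1, h2, h3]
      · have h3 : s % 10 = magic_number := le_antisymm (not_lt.mp h2) (not_lt.mp h1)
        simp [h1, h2, h3]

-- ===== VERDICT (by name: the statement is the Claim_ definition above) =====
theorem split_file_list_spec : Claim_equal_split_file_list := by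
  intro xs m _
  show _ = _
  simp [split_file_list, split_file_list_alt, sflGo_eq]
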